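-- pv_equiv track=rewrite | github.com/piedro404/resolucoes-de-problemas | Algoritmos/subset_sum_for_combinations.py | subset_sum_4_manual
-- ===== SOURCE A (Python) =====
-- def subset_sum_4_manual(nums, alvo):
--     resultados = []
--     n = len(nums)
--     for i in range(n):
--         for j in range(i+1, n):
--             for k in range(j+1, n):
--                 for l in range(k+1, n):
--                     if nums[i] + nums[j] + nums[k] + nums[l] == alvo:
--                         resultados.append((nums[i], nums[j], nums[k], nums[l]))
--     return resultados
--
-- nums = [-1, 23, 4, -8, 4, 23, 4, 5]
--
-- alvo = 30
--
-- resultados = subset_sum_4_manual(nums, alvo)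
-- ===== SOURCE B (Python) =====
-- def subset_sum_4_manual(nums, alvo):
--     # Meet-in-the-middle over index pairs: list all pairs (k, l), k < l, once in
--     # lex order, index them by pair sum, and for each leading pair (i, j) look up
--     # the trailing pairs with the complementary sum and k > j.
--     n = len(nums)
--     pairs = [(k, l) for k in range(n) for l in range(k + 1, n)]
--     by_sum = {}
--     for (k, l) in pairs:
--         by_sum.setdefault(nums[k] + nums[l], []).append((k, l))
--     resultados = []
--     for (i, j) in pairs:
--         for (k, l) in by_sum.get(alvo - nums[i] - nums[j], []):
--             if k > j:
--                 resultados.append((nums[i], nums[j], nums[k], nums[l]))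
--     return resultados
-- ===== Notes on version B (the rewrite author's own statement) =====
-- stated objective: faster
-- what changed: B replaces A's four nested index loops by meet-in-the-middle: it lists all index pairs (k,l) with k<l once in lex order, builds a hash index pair-sum -> list of pairs, and for each leading pair (i,j) looks up the trailing pairs with sum alvo-nums[i]-nums[j] and k>j.
import Mathlib
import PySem

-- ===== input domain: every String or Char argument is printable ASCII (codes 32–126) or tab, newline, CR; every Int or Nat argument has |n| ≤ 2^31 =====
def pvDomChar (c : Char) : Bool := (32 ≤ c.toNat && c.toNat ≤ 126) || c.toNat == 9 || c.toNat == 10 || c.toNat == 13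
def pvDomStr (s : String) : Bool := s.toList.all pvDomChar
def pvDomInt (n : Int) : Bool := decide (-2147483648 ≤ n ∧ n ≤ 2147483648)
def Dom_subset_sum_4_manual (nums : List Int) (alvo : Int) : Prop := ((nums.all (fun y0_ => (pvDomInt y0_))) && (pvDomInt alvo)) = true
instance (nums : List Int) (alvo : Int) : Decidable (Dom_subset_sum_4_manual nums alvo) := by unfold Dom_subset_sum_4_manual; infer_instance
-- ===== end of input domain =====

-- B replaces A's four nested index loops by a meet-in-the-middle over index pairs: all pairs (k,l), k<l, are listed once, indexed by pair sum, and each leading pair (i,j) looks up the trailing pairs with the complementary sum (faster; same return value).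

-- ===== PORT A =====
def subset_sum_4_manual (nums : List Int) (alvo : Int) : List (List Int) :=
  let n : Int := nums.length
  (PySem.List.pyRange 0 n 1).foldl (fun resultados i =>
    (PySem.List.pyRange (i+1) n 1).foldl (fun resultados j =>
      (PySem.List.pyRange (j+1) n 1).foldl (fun resultados k =>
        (PySem.List.pyRange (k+1) n 1).foldl (fun resultados l =>
          if PySem.List.pyGetD nums i 0 + PySem.List.pyGetD nums j 0 +
             PySem.List.pyGetD nums k 0 + PySem.List.pyGetD nums l 0 == alvo then
            resultados ++ [[PySem.List.pyGetD nums i 0, PySem.List.pyGetD nums j 0,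
                            PySem.List.pyGetD nums k 0, PySem.List.pyGetD nums l 0]]
          else resultados) resultados) resultados) resultados) []

-- ===== PORT B =====
def subset_sum_4_manual_alt (nums : List Int) (alvo : Int) : List (List Int) :=
  let n : Int := nums.length
  let pairs : List (Int × Int) :=
    (PySem.List.pyRange 0 n 1).flatMap (fun k =>
      (PySem.List.pyRange (k+1) n 1).map (fun l => (k, l)))
  let bySum : PySem.Dict Int (List (Int × Int)) :=
    pairs.foldl (fun d p =>
      d.modify (PySem.List.pyGetD nums p.1 0 + PySem.List.pyGetD nums p.2 0) [] (· ++ [p]))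
      PySem.Dict.empty
  pairs.foldl (fun resultados p =>
    (bySum.getD (alvo - PySem.List.pyGetD nums p.1 0 - PySem.List.pyGetD nums p.2 0) []).foldl
      (fun resultados q =>
        if p.2 < q.1 then
          resultados ++ [[PySem.List.pyGetD nums p.1 0, PySem.List.pyGetD nums p.2 0,
                          PySem.List.pyGetD nums q.1 0, PySem.List.pyGetD nums q.2 0]]
        else resultados) resultados) []

-- ===== PRECONDITION & SPEC =====
def Spec_subset_sum_4_manual (nums : List Int) (alvo : Int) (out : List (List Int)) : Prop := out = subset_sum_4_manual_alt nums alvo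
instance (nums : List Int) (alvo : Int) (out : List (List Int)) : Decidable (Spec_subset_sum_4_manual nums alvo out) := by unfold Spec_subset_sum_4_manual; infer_instance

-- ===== CLAIM (what is proved, stated in full; the proofs are below) =====
def Claim_equal_subset_sum_4_manual : Prop := ∀ (nums : List Int) (alvo : Int), Dom_subset_sum_4_manual nums alvo → Spec_subset_sum_4_manual nums alvo (subset_sum_4_manual nums alvo)

-- ===== LEMMAS AND PROOFS =====

-- the pair list of B, and its tail segment starting at a
def pvPairsFrom (nums : List Int) (a : Int) : List (Int × Int) :=
  (PySem.List.pyRange a (nums.length : Int) 1).flatMap (fun k =>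
    (PySem.List.pyRange (k+1) (nums.length : Int) 1).map (fun l => (k, l)))

-- B's sum index characterised: the pairs whose values sum to c, in B's pair order
lemma bySum_getD (nums : List Int) (c : Int) :
    ((pvPairsFrom nums 0).foldl (fun d p =>
        d.modify (PySem.List.pyGetD nums p.1 0 + PySem.List.pyGetD nums p.2 0) [] (· ++ [p]))
        (PySem.Dict.empty : PySem.Dict Int (List (Int × Int)))).getD c []
    = (pvPairsFrom nums 0).filter
        (fun p => PySem.List.pyGetD nums p.1 0 + PySem.List.pyGetD nums p.2 0 == c) := by
  have h : (pvPairsFrom nums 0).foldl (fun d p =>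
        d.modify (PySem.List.pyGetD nums p.1 0 + PySem.List.pyGetD nums p.2 0) [] (· ++ [p]))
        (PySem.Dict.empty : PySem.Dict Int (List (Int × Int)))
      = ((pvPairsFrom nums 0).map (fun p =>
          (PySem.List.pyGetD nums p.1 0 + PySem.List.pyGetD nums p.2 0, p))).foldl
        (fun d q => d.modify q.1 [] (· ++ [q.2])) PySem.Dict.empty := by
    rw [List.foldl_map]
  rw [h, PySem.Dict.getD_foldl_modify_append]
  rw [List.filter_map, List.map_map]
  simp [Function.comp_def]

-- the pairs of B with first index > j are exactly the tail segment from j+1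
lemma pairs_filter_gt (nums : List Int) (j : Int) (hj : 0 ≤ j) :
    (pvPairsFrom nums 0).filter (fun p => decide (j < p.1))
    = pvPairsFrom nums (j+1) := by
  unfold pvPairsFrom
  rw [List.filter_flatMap]
  by_cases hn : j + 1 ≤ (nums.length : Int)
  · rw [PySem.List.pyRange_one_append 0 (j+1) (nums.length : Int) (by omega) hn,
        List.flatMap_append]
    have h1 : (PySem.List.pyRange 0 (j+1) 1).flatMap (fun k =>
        ((PySem.List.pyRange (k+1) (nums.length : Int) 1).map (fun l => (k, l))).filter
          (fun p => decide (j < p.1))) = [] := by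
      apply List.flatMap_eq_nil_iff.mpr
      intro k hk
      have := (PySem.List.mem_pyRange_one).1 hk
      rw [List.filter_map]
      have : ∀ l, (fun p : Int × Int => decide (j < p.1)) ((fun l => (k, l)) l) = false := by
        intro l; simp; omega
      simp only [Function.comp_def, this, List.filter_false, List.map_nil]
    rw [h1, List.nil_append]
    apply List.flatMap_congr
    intro k hk
    have := (PySem.List.mem_pyRange_one).1 hk
    rw [List.filter_map]
    have heq : ∀ l, (fun p : Int × Int => decide (j < p.1)) ((fun l => (k, l)) l) = true := by
      intro l; simp; omega
    simp only [Function.comp_def, heq, List.filter_true]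
  · -- n ≤ j+1: the whole-range flatMap has no k > j, and the tail segment is empty
    have h1 : (PySem.List.pyRange 0 (nums.length : Int) 1).flatMap (fun k =>
        ((PySem.List.pyRange (k+1) (nums.length : Int) 1).map (fun l => (k, l))).filter
          (fun p => decide (j < p.1))) = [] := by
      apply List.flatMap_eq_nil_iff.mpr
      intro k hk
      have := (PySem.List.mem_pyRange_one).1 hk
      rw [List.filter_map]
      have : ∀ l, (fun p : Int × Int => decide (j < p.1)) ((fun l => (k, l)) l) = false := by
        intro l; simp; omega
      simp only [Function.comp_def, this, List.filter_false, List.map_nil]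
    have h2 : PySem.List.pyRange (j+1) (nums.length : Int) 1 = [] := by
      apply PySem.List.pyRange_one_eq_nil
      omega
    rw [h1, h2, List.flatMap_nil]

-- ===== VERDICT (by name: the statement is the Claim_ definition above) =====
-- A in flatMap/filter normal form
lemma A_norm (nums : List Int) (alvo : Int) :
    subset_sum_4_manual nums alvo
    = (PySem.List.pyRange 0 (nums.length : Int) 1).flatMap (fun i =>
        (PySem.List.pyRange (i+1) (nums.length : Int) 1).flatMap (fun j =>
          (PySem.List.pyRange (j+1) (nums.length : Int) 1).flatMap (fun k =>
            ((PySem.List.pyRange (k+1) (nums.length : Int) 1).filter (fun l =>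
                PySem.List.pyGetD nums i 0 + PySem.List.pyGetD nums j 0 +
                PySem.List.pyGetD nums k 0 + PySem.List.pyGetD nums l 0 == alvo)).map (fun l =>
              [PySem.List.pyGetD nums i 0, PySem.List.pyGetD nums j 0,
               PySem.List.pyGetD nums k 0, PySem.List.pyGetD nums l 0])))) := by
  unfold subset_sum_4_manual
  simp only [PySem.List.foldl_append_if, PySem.List.foldl_append_eq_flatMap, List.nil_append]

-- B in flatMap/filter normal form
lemma B_norm (nums : List Int) (alvo : Int) :
    subset_sum_4_manual_alt nums alvo
    = (pvPairsFrom nums 0).flatMap (fun p =>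
        (((pvPairsFrom nums 0).filter (fun q =>
              PySem.List.pyGetD nums q.1 0 + PySem.List.pyGetD nums q.2 0 ==
                alvo - PySem.List.pyGetD nums p.1 0 - PySem.List.pyGetD nums p.2 0)).filter
            (fun q => decide (p.2 < q.1))).map (fun q =>
          [PySem.List.pyGetD nums p.1 0, PySem.List.pyGetD nums p.2 0,
           PySem.List.pyGetD nums q.1 0, PySem.List.pyGetD nums q.2 0])) := by
  unfold subset_sum_4_manual_alt
  simp only []
  rw [show ((PySem.List.pyRange 0 (nums.length : Int) 1).flatMap (fun k =>
      (PySem.List.pyRange (k+1) (nums.length : Int) 1).map (fun l => (k, l))))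
      = pvPairsFrom nums 0 from rfl]
  simp only [bySum_getD, PySem.List.foldl_append_ite, PySem.List.foldl_append_eq_flatMap,
    List.nil_append]

-- a loop over B's pair list is a double loop over its two indices
lemma flatMap_pairs {α : Type} (nums : List Int) (a : Int) (F : Int × Int → List α) :
    (pvPairsFrom nums a).flatMap F
    = (PySem.List.pyRange a (nums.length : Int) 1).flatMap (fun i =>
        (PySem.List.pyRange (i+1) (nums.length : Int) 1).flatMap (fun j => F (i, j))) := by
  unfold pvPairsFrom
  rw [List.flatMap_assoc]
  apply List.flatMap_congr
  intro i _
  rw [List.flatMap_map]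

-- ===== VERDICT (by name: the statement is the Claim_ definition above) =====
theorem subset_sum_4_manual_spec : Claim_equal_subset_sum_4_manual := by
  intro nums alvo _
  unfold Spec_subset_sum_4_manual
  rw [A_norm, B_norm]
  -- expand the outer pair loop of B into the i and j loops of A
  rw [flatMap_pairs]
  apply List.flatMap_congr
  intro i hi
  apply List.flatMap_congr
  intro j hj
  have hj' := (PySem.List.mem_pyRange_one).1 hj
  have hi' := (PySem.List.mem_pyRange_one).1 hi
  dsimp only
  -- the trailing-pair lookup of B equals the k and l loops of A
  rw [List.filter_comm, pairs_filter_gt nums j (by omega)]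
  unfold pvPairsFrom
  rw [List.filter_flatMap, List.map_flatMap]
  apply List.flatMap_congr
  intro k hk
  have hk' := (PySem.List.mem_pyRange_one).1 hk
  rw [List.filter_map, List.map_map]
  congr 1
  apply List.filter_congr
  intro l hl
  have : (PySem.List.pyGetD nums i 0 + PySem.List.pyGetD nums j 0 + PySem.List.pyGetD nums k 0 +
      PySem.List.pyGetD nums l 0 = alvo)
      ↔ (PySem.List.pyGetD nums k 0 + PySem.List.pyGetD nums l 0 =
        alvo - PySem.List.pyGetD nums i 0 - PySem.List.pyGetD nums j 0) := by omega
  simp [this]
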